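-- pv_equiv track=rewrite | github.com/nikhilc2710/funprojects | Algoscripts/xx.py | solve
-- ===== SOURCE A (Python) =====
-- def solve(a):
--     mi=mx=0
--     length=len(a)
--     for i in range(len(a)):
--         if a[mi]>=a[i]:
--             mi=i
--         if a[mx]<a[i]:
--             mx=i
--     if mi<mx:
--         length-=1
--         return (length-mi)+(mx-1)
--     else:
--         return (length-mi)+mx-1
-- ===== SOURCE B (Python) =====
-- def solve(a):
--     n = len(a)
--     order = sorted(range(n), key=lambda i: (a[i], -i))
--     mi, mx = order[0], order[-1]
--     if mi < mx:
--         return (n - 1 - mi) + (mx - 1)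
--     return (n - mi) + mx - 1
-- ===== Notes on version B (the rewrite author's own statement) =====
-- stated objective: alternative
-- what changed: Replaces A's fused index-tracking scan with one stable sort of the index list by key (a[i], -i): the sorted order's first entry is the last argmin and its last entry is the first argmax, then the same offset formula is applied.
-- outside the precondition, e.g. on solve([]): A returns -1, B raises IndexError
import Mathlib
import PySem

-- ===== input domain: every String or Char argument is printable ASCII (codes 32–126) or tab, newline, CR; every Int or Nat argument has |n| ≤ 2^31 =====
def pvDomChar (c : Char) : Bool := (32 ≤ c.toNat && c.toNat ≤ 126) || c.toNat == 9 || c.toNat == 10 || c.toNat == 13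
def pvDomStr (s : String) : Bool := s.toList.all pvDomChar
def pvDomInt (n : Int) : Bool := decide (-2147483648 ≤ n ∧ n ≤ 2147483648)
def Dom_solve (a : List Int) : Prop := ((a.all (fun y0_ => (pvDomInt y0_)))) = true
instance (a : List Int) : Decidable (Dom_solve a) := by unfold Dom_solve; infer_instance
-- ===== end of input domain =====

-- B replaces A's fused one-pass index-tracking scan with a single stable sort of the
-- index list by the key (a[i], -i) and reads the last argmin / first argmax off its ends.

-- ===== PORT A =====
-- loop body: the two `if` updates of mi and mx (reads a[mi], a[mx], a[i]; always in range here)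
def pvStep (a : List Int) (p : Int × Int) (i : Int) : Int × Int :=
  (if PySem.List.pyGetD a p.1 0 ≥ PySem.List.pyGetD a i 0 then i else p.1,
   if PySem.List.pyGetD a p.2 0 < PySem.List.pyGetD a i 0 then i else p.2)

def solve (a : List Int) : Int :=
  let length : Int := a.length
  let st := (PySem.List.pyRange 0 (a.length : Int)).foldl (pvStep a) (0, 0)
  if st.1 < st.2 then ((length - 1) - st.1) + (st.2 - 1)
  else (length - st.1) + st.2 - 1

-- ===== PORT B =====
def solve_alt (a : List Int) : Int :=
  let n : Int := a.length
  let order := PySem.List.sorted2 (PySem.List.pyRange 0 n)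
      (fun i => PySem.List.pyGetD a i 0) (fun i => -i)
  match PySem.List.pyGet? order 0, PySem.List.pyGet? order (-1) with
  | some mi, some mx =>
      if mi < mx then (n - 1 - mi) + (mx - 1) else (n - mi) + mx - 1
  | _, _ => 0   -- indexing the empty sorted order raises IndexError: outside Pre_solve

-- ===== PRECONDITION & SPEC =====
-- Pre_ excludes the empty list: there A's loop never runs and it returns the leftover-state
-- value -1, while B indexes into the empty sorted order and raises IndexError.
def Pre_solve (a : List Int) : Prop := a ≠ []
instance (a : List Int) : Decidable (Pre_solve a) := by unfold Pre_solve; infer_instance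
def pvWitness_solve : List Int := [1, 2]

def Spec_solve (a : List Int) (out : Int) : Prop := out = solve_alt a
instance (a : List Int) (out : Int) : Decidable (Spec_solve a out) := by unfold Spec_solve; infer_instance

-- ===== CLAIM (what is proved, stated in full; the proofs are below) =====
def Claim_equal_solve : Prop := ∀ (a : List Int), Dom_solve a → Pre_solve a → Spec_solve a (solve a)

-- ===== LEMMAS AND PROOFS =====

-- "m is the LAST argmin of the first k entries" / "m is the FIRST argmax of the first k entries"
def pvMinSpecK (a : List Int) (k m : Nat) : Prop :=
  m < k ∧ (∀ j, j < k → a.getD m 0 ≤ a.getD j 0) ∧ (∀ j, m < j → j < k → a.getD m 0 < a.getD j 0)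

def pvMaxSpecK (a : List Int) (k m : Nat) : Prop :=
  m < k ∧ (∀ j, j < k → a.getD j 0 ≤ a.getD m 0) ∧ (∀ j, j < m → a.getD j 0 < a.getD m 0)

lemma pvMinSpecK_unique {a : List Int} {k m1 m2 : Nat}
    (h1 : pvMinSpecK a k m1) (h2 : pvMinSpecK a k m2) : m1 = m2 := by
  obtain ⟨hb1, hle1, hlt1⟩ := h1
  obtain ⟨hb2, hle2, hlt2⟩ := h2
  rcases Nat.lt_trichotomy m1 m2 with h | h | h
  · exact absurd (hle2 m1 hb1) (by simpa using hlt1 m2 h hb2)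
  · exact h
  · exact absurd (hle1 m2 hb2) (by simpa using hlt2 m1 h hb1)

lemma pvMaxSpecK_unique {a : List Int} {k m1 m2 : Nat}
    (h1 : pvMaxSpecK a k m1) (h2 : pvMaxSpecK a k m2) : m1 = m2 := by
  obtain ⟨hb1, hle1, hlt1⟩ := h1
  obtain ⟨hb2, hle2, hlt2⟩ := h2
  rcases Nat.lt_trichotomy m1 m2 with h | h | h
  · exact absurd (hle1 m2 hb2) (by simpa using hlt2 m1 h)
  · exact h
  · exact absurd (hle2 m1 hb1) (by simpa using hlt1 m2 h)

-- invariant of A's loop over range(k)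
lemma pvFoldA_spec (a : List Int) :
    ∀ k : Nat, 1 ≤ k → k ≤ a.length →
      ∃ mi mx : Nat,
        (PySem.List.pyRange 0 (k : Int)).foldl (pvStep a) (0, 0) = ((mi : Int), (mx : Int)) ∧
        pvMinSpecK a k mi ∧ pvMaxSpecK a k mx := by
  intro k
  induction k with
  | zero => intro h; omega
  | succ k ih =>
    intro _ hk1
    by_cases hk : 1 ≤ k
    · obtain ⟨mi, mx, hfold, hmin, hmax⟩ := ih hk (by omega)
      refine ⟨?_, ?_, ?_⟩
      case _ => exact if a.getD mi 0 ≥ a.getD k 0 then k else mi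
      case _ => exact if a.getD mx 0 < a.getD k 0 then k else mx
      have hrange : PySem.List.pyRange 0 ((k + 1 : Nat) : Int) =
          PySem.List.pyRange 0 (k : Int) ++ [(k : Int)] := by
        push_cast
        exact PySem.List.pyRange_one_succ_right (by positivity)
      constructor
      · rw [hrange, List.foldl_append, hfold]
        simp only [List.foldl, pvStep, PySem.List.pyGetD_natCast]
        split_ifs <;> simp
      constructor
      · -- min component
        obtain ⟨hb, hle, hlt⟩ := hmin
        by_cases c : a.getD mi 0 ≥ a.getD k 0
        · simp only [if_pos c]
          refine ⟨by omega, ?_, by omega⟩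
          intro j hj
          rcases Nat.lt_or_ge j k with hj' | hj'
          · exact le_trans c (hle j hj')
          · have : j = k := by omega
            simp [this]
        · simp only [if_neg c]
          have c' : a.getD mi 0 < a.getD k 0 := by omega
          refine ⟨by omega, ?_, ?_⟩
          · intro j hj
            rcases Nat.lt_or_ge j k with hj' | hj'
            · exact hle j hj'
            · have : j = k := by omega
              simp [this]; exact le_of_lt c'
          · intro j hmj hj
            rcases Nat.lt_or_ge j k with hj' | hj'
            · exact hlt j hmj hj'
            · have : j = k := by omega
              simp [this]; exact c'
      · -- max component
        obtain ⟨hb, hle, hlt⟩ := hmax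
        by_cases c : a.getD mx 0 < a.getD k 0
        · simp only [if_pos c]
          refine ⟨by omega, ?_, ?_⟩
          · intro j hj
            rcases Nat.lt_or_ge j k with hj' | hj'
            · exact le_of_lt (lt_of_le_of_lt (hle j hj') c)
            · have : j = k := by omega
              simp [this]
          · intro j hj
            rcases Nat.lt_or_ge j k with hj' | hj'
            · exact lt_of_le_of_lt (hle j hj') c
            · omega
        · simp only [if_neg c]
          have c' : a.getD k 0 ≤ a.getD mx 0 := by omega
          refine ⟨by omega, ?_, hlt⟩
          intro j hj
          rcases Nat.lt_or_ge j k with hj' | hj'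
          · exact hle j hj'
          · have : j = k := by omega
            simp [this]; exact c'
    · -- k = 0 : base case, one iteration on index 0
      have hk0 : k = 0 := by omega
      subst hk0
      refine ⟨0, 0, ?_, ?_, ?_⟩
      · have : PySem.List.pyRange 0 ((0 + 1 : Nat) : Int) = [(0 : Int)] := by
          push_cast
          simpa using PySem.List.pyRange_one_singleton 0
        rw [this]
        simp [pvStep]
      · exact ⟨by omega, by intro j hj; interval_cases j; rfl, by omega⟩
      · exact ⟨by omega, by intro j hj; interval_cases j; rfl, by omega⟩

-- ===== B-side development: sorted2's comparator and the foldl-insertBy invariant =====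

-- the strict lexicographic comparator sorted2 uses for key (a[i], -i)
def pvLt (a : List Int) (p q : Int) : Bool :=
  decide (PySem.List.pyGetD a p 0 < PySem.List.pyGetD a q 0) ||
  (!decide (PySem.List.pyGetD a q 0 < PySem.List.pyGetD a p 0) && decide (-p < -q))

lemma pvSorted2_eq (a : List Int) (xs : List Int) :
    PySem.List.sorted2 xs (fun i => PySem.List.pyGetD a i 0) (fun i => -i) =
    xs.foldl (fun acc x => PySem.List.insertBy (pvLt a) x acc) [] := rfl

lemma pvLt_iff (a : List Int) (p q : Int) :
    pvLt a p q = true ↔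
      (PySem.List.pyGetD a p 0 < PySem.List.pyGetD a q 0 ∨
       (PySem.List.pyGetD a p 0 = PySem.List.pyGetD a q 0 ∧ q < p)) := by
  simp [pvLt]; omega

lemma pvLt_trans (a : List Int) {p q r : Int}
    (h1 : pvLt a p q = true) (h2 : pvLt a q r = true) : pvLt a p r = true := by
  rw [pvLt_iff] at *; omega

lemma pvLt_total (a : List Int) {p q : Int} (h : p ≠ q) :
    pvLt a p q = true ∨ pvLt a q p = true := by
  rw [pvLt_iff, pvLt_iff]; omega

lemma pvInsertBy_perm {α : Type} (c : α → α → Bool) (x : α) (l : List α) :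
    (PySem.List.insertBy c x l).Perm (x :: l) := by
  induction l with
  | nil => simp [PySem.List.insertBy]
  | cons y ys ih =>
    unfold PySem.List.insertBy
    split
    · exact List.Perm.refl _
    · exact List.Perm.trans (List.Perm.cons y ih) (List.Perm.swap x y ys)

lemma pvInsertBy_pairwise (a : List Int) (x : Int) (l : List Int)
    (hpw : l.Pairwise (fun p q => pvLt a p q = true)) (hx : ∀ y ∈ l, x ≠ y) :
    (PySem.List.insertBy (pvLt a) x l).Pairwise (fun p q => pvLt a p q = true) := by
  induction l with
  | nil => simp [PySem.List.insertBy]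
  | cons y ys ih =>
    rcases List.pairwise_cons.mp hpw with ⟨hy, hys⟩
    unfold PySem.List.insertBy
    split
    · rename_i hxy
      refine List.pairwise_cons.mpr ⟨?_, hpw⟩
      intro z hz
      rcases hz with _ | hz
      · exact hxy
      · exact pvLt_trans a hxy (hy _ (by assumption))
    · rename_i hxy
      refine List.pairwise_cons.mpr ⟨?_, ih hys (fun z hz => hx z (List.mem_cons_of_mem y hz))⟩
      intro z hz
      rcases (PySem.List.mem_insertBy _ _ _ _).mp hz with rfl | hz
      · rcases pvLt_total a (hx y (List.mem_cons_self)) with h | h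
        · exact absurd h (by simpa using hxy)
        · exact h
      · exact hy z hz

lemma pvFoldB_spec (a : List Int) :
    ∀ (xs acc : List Int), (xs ++ acc).Nodup →
      acc.Pairwise (fun p q => pvLt a p q = true) →
      ((xs.foldl (fun acc x => PySem.List.insertBy (pvLt a) x acc) acc).Perm (xs ++ acc) ∧
       (xs.foldl (fun acc x => PySem.List.insertBy (pvLt a) x acc) acc).Pairwise
         (fun p q => pvLt a p q = true)) := by
  intro xs
  induction xs with
  | nil => intro acc _ hpw; exact ⟨by simp, hpw⟩
  | cons x xs ih =>
    intro acc hnd hpw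
    have hperm1 : (PySem.List.insertBy (pvLt a) x acc).Perm (x :: acc) :=
      pvInsertBy_perm _ _ _
    have hnd' : (xs ++ PySem.List.insertBy (pvLt a) x acc).Nodup := by
      have hp1 : (xs ++ PySem.List.insertBy (pvLt a) x acc).Perm (xs ++ x :: acc) :=
        List.Perm.append_left xs hperm1
      have hp2 : (xs ++ x :: acc).Perm (x :: (xs ++ acc)) := List.perm_middle
      exact ((hp1.trans hp2).nodup_iff).mpr (by simpa using hnd)
    have hxnot : ∀ y ∈ acc, x ≠ y := by
      intro y hy
      have := hnd
      simp only [List.cons_append, List.nodup_cons] at this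
      rintro rfl
      exact this.1 (List.mem_append_right xs hy)
    have hpw' := pvInsertBy_pairwise a x acc hpw hxnot
    obtain ⟨hp2, hpw2⟩ := ih (PySem.List.insertBy (pvLt a) x acc) hnd' hpw'
    refine ⟨?_, hpw2⟩
    have q1 : (xs ++ PySem.List.insertBy (pvLt a) x acc).Perm (xs ++ x :: acc) :=
      List.Perm.append_left xs hperm1
    have q2 : (xs ++ x :: acc).Perm (x :: xs ++ acc) := by
      simp
    exact (hp2.trans q1).trans q2

-- ===== VERDICT (by name: the statement is the Claim_ definition above) =====
theorem solve_spec : Claim_equal_solve := by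
  unfold Claim_equal_solve
  intro a _ hpre
  unfold Pre_solve at hpre
  have hlen : 1 ≤ a.length := by
    cases a with
    | nil => exact absurd rfl hpre
    | cons x t => simp
  -- B's sorted index order: a permutation of range(n), pairwise strictly pvLt-increasing
  obtain ⟨hperm, hpw⟩ := pvFoldB_spec a (PySem.List.pyRange 0 (a.length : Int)) []
    (by simpa using PySem.List.nodup_pyRange_one 0 (a.length : Int)) List.Pairwise.nil
  set ord := (PySem.List.pyRange 0 (a.length : Int)).foldl
      (fun acc x => PySem.List.insertBy (pvLt a) x acc) [] with hOrd
  have hmemord : ∀ y : Int, y ∈ ord ↔ (0 ≤ y ∧ y < (a.length : Int)) := by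
    intro y
    rw [hperm.mem_iff]
    simp [PySem.List.mem_pyRange_one]
  have hne : ord ≠ [] := by
    intro h
    have := hperm.length_eq
    rw [h] at this
    simp [PySem.List.length_pyRange_one] at this
    omega
  obtain ⟨m, t, hord⟩ : ∃ m t, ord = m :: t := by
    cases h : ord with
    | nil => exact absurd h hne
    | cons m t => exact ⟨m, t, rfl⟩
  set z := ord.getLast hne with hz
  -- head fact: m beats every other element
  have hhead : ∀ y ∈ ord, y ≠ m → pvLt a m y = true := by
    intro y hy hne'
    have hpw2 := hpw
    rw [hord] at hy hpw2
    rcases hy with _ | hy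
    · exact absurd rfl hne'
    · exact (List.pairwise_cons.mp hpw2).1 y (by assumption)
  -- last fact: every other element beats z
  have hlast : ∀ y ∈ ord, y ≠ z → pvLt a y z = true := by
    intro y hy hne'
    have hsplit : ord.dropLast ++ [z] = ord := List.dropLast_append_getLast hne
    have hy' : y ∈ ord.dropLast := by
      rw [← hsplit] at hy
      rcases List.mem_append.mp hy with h | h
      · exact h
      · exact absurd (List.mem_singleton.mp h) hne'
    have hpw' := hpw
    rw [← hsplit] at hpw'
    exact (List.pairwise_append.mp hpw').2.2 y hy' z (List.mem_singleton_self z)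
  have hmmem : m ∈ ord := by rw [hord]; exact List.mem_cons_self
  have hzmem : z ∈ ord := List.getLast_mem hne
  have hmb := (hmemord m).mp hmmem
  have hzb := (hmemord z).mp hzmem
  have hmcast : ((m.toNat : Nat) : Int) = m := Int.toNat_of_nonneg hmb.1
  have hzcast : ((z.toNat : Nat) : Int) = z := Int.toNat_of_nonneg hzb.1
  -- translate pvLt facts into the argmin/argmax specs
  have hminB : pvMinSpecK a a.length m.toNat := by
    refine ⟨by omega, ?_, ?_⟩
    · intro j hj
      by_cases hjm : (j : Int) = m
      · have : m.toNat = j := by omega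
        simp [this]
      · have h := hhead (j : Int) ((hmemord _).mpr (by constructor <;> omega)) hjm
        rw [pvLt_iff] at h
        rw [← hmcast] at h
        simp only [PySem.List.pyGetD_natCast] at h
        omega
    · intro j hmj hj
      have hjm : (j : Int) ≠ m := by omega
      have h := hhead (j : Int) ((hmemord _).mpr (by constructor <;> omega)) hjm
      rw [pvLt_iff] at h
      rw [← hmcast] at h
      simp only [PySem.List.pyGetD_natCast] at h
      omega
  have hmaxB : pvMaxSpecK a a.length z.toNat := by
    refine ⟨by omega, ?_, ?_⟩
    · intro j hj
      by_cases hjz : (j : Int) = z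
      · have : z.toNat = j := by omega
        simp [this]
      · have h := hlast (j : Int) ((hmemord _).mpr (by constructor <;> omega)) hjz
        rw [pvLt_iff] at h
        rw [← hzcast] at h
        simp only [PySem.List.pyGetD_natCast] at h
        omega
    · intro j hjz
      have hjz' : (j : Int) ≠ z := by omega
      have h := hlast (j : Int) ((hmemord _).mpr (by constructor <;> omega)) hjz'
      rw [pvLt_iff] at h
      rw [← hzcast] at h
      simp only [PySem.List.pyGetD_natCast] at h
      omega
  -- A's loop reaches exactly those two indices
  obtain ⟨mi, mx, hfold, hminA, hmaxA⟩ := pvFoldA_spec a a.length hlen le_rfl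
  have hmi_eq : mi = m.toNat := pvMinSpecK_unique hminA hminB
  have hmx_eq : mx = z.toNat := pvMaxSpecK_unique hmaxA hmaxB
  -- evaluate both ports
  have e1 : PySem.List.pyGet? ord 0 = some m := by
    rw [hord]; exact PySem.List.pyGet?_zero_cons m t
  have e2 : PySem.List.pyGet? ord (-1) = some z := by
    rw [PySem.List.pyGet?_neg_one, hz, List.getLast?_eq_some_getLast]
  unfold Spec_solve solve solve_alt
  simp only [pvSorted2_eq, ← hOrd, e1, e2, hfold, hmi_eq, hmx_eq, hmcast, hzcast]
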